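-- pv_equiv track=rewrite | github.com/bailangguihun/EMMA-Q-Back | MASEval/MASEval/music_eval_competition_light.py | infer_triad
-- ===== SOURCE A (Python) =====
-- from typing import Any, Dict, List, Optional, Tuple
--
-- NOTE_NAMES = ["C", "C#", "D", "D#", "E", "F", "F#", "G", "G#", "A", "A#", "B"]
--
-- def infer_triad(pitch_classes: List[int]) -> Optional[str]:
--     pcs = set(pitch_classes)
--     if not pcs:
--         return None
--     best_name = None
--     best_score = 0
--     for root in range(12):
--         major = {root, (root + 4) % 12, (root + 7) % 12}
--         minor = {root, (root + 3) % 12, (root + 7) % 12}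
--         major_score = len(pcs & major)
--         minor_score = len(pcs & minor)
--         if major_score >= 2 and major_score > best_score:
--             best_score = major_score
--             best_name = f"{NOTE_NAMES[root]}:maj"
--         if minor_score >= 2 and minor_score > best_score:
--             best_score = minor_score
--             best_name = f"{NOTE_NAMES[root]}:min"
--     return best_name
-- ===== SOURCE B (Python) =====
-- NOTE_NAMES = ["C", "C#", "D", "D#", "E", "F", "F#", "G", "G#", "A", "A#", "B"]
--
-- def infer_triad(pitch_classes):
--     # Scatter phase: each distinct pitch class votes for the six triads containing it.
--     maj = {}
--     mnr = {}
--     for pc in set(pitch_classes):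
--         if 0 <= pc < 12:
--             for r in (pc, (pc - 4) % 12, (pc - 7) % 12):
--                 maj[r] = maj.get(r, 0) + 1
--             for r in (pc, (pc - 3) % 12, (pc - 7) % 12):
--                 mnr[r] = mnr.get(r, 0) + 1
--     # Selection phase: scan candidates in root order, major before minor.
--     best_name = None
--     best_score = 0
--     for r in range(12):
--         ms = maj.get(r, 0)
--         if ms >= 2 and ms > best_score:
--             best_score = ms
--             best_name = NOTE_NAMES[r] + ":maj"
--         ns = mnr.get(r, 0)
--         if ns >= 2 and ns > best_score:
--             best_score = ns
--             best_name = NOTE_NAMES[r] + ":min"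
--     return best_name
-- ===== Notes on version B (the rewrite author's own statement) =====
-- stated objective: alternative
-- what changed: Inverts the traversal: instead of intersecting the pitch-class set with each of the 24 triad templates, B scatters one vote per distinct pitch class into two score dictionaries (three major and three minor roots each) and then selects by a plain scan over the 12 roots; the empty-set early return disappears since the scan naturally yields None.
import Mathlib
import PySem

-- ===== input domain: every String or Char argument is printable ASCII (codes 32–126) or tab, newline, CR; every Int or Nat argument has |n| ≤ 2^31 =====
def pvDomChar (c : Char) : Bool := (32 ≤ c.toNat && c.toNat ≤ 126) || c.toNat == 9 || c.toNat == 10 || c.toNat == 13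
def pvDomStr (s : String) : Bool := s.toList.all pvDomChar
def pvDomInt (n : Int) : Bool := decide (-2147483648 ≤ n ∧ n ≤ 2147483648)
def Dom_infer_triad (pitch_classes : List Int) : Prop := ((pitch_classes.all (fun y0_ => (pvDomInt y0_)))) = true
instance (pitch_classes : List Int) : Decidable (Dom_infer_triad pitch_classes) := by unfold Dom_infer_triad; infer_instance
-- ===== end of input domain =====

-- B inverts A's gather over the 24 triad templates into a scatter of one vote per distinct
-- pitch class into two score dictionaries, then a plain selection scan over the 12 roots
-- (alternative decomposition, same cost).

-- NOTE_NAMES (module constant)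
def noteNames : List String := ["C", "C#", "D", "D#", "E", "F", "F#", "G", "G#", "A", "A#", "B"]

-- ===== PORT A =====
-- NOTE_NAMES[root] is indexed with root ∈ range(12), always in range: pyGetD is exact here.
def infer_triad (pitch_classes : List Int) : Option String :=
  let pcs : PySem.Set Int := PySem.Set.ofList pitch_classes
  if pcs = [] then none
  else
    ((PySem.List.pyRange 0 12).foldl (fun (st : Option String × Int) root =>
      let major : PySem.Set Int :=
        PySem.Set.ofList [root, PySem.Int.mod (root + 4) 12, PySem.Int.mod (root + 7) 12]
      let minor : PySem.Set Int :=
        PySem.Set.ofList [root, PySem.Int.mod (root + 3) 12, PySem.Int.mod (root + 7) 12]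
      let major_score : Int := PySem.Set.len (PySem.Set.inter pcs major)
      let minor_score : Int := PySem.Set.len (PySem.Set.inter pcs minor)
      let st1 := if major_score ≥ 2 ∧ major_score > st.2 then
          (some (PySem.List.pyGetD noteNames root "" ++ ":maj"), major_score) else st
      if minor_score ≥ 2 ∧ minor_score > st1.2 then
          (some (PySem.List.pyGetD noteNames root "" ++ ":min"), minor_score) else st1
    ) ((none : Option String), (0 : Int))).1

-- ===== PORT B =====
-- Scatter phase: each distinct pitch class (a set, consumed only to build count dicts that are
-- looked up afterwards, so iteration order cannot matter) votes for the six triads containing it;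
-- then a selection scan over the 12 roots.
def infer_triad_alt (pitch_classes : List Int) : Option String :=
  let tabs := (PySem.Set.ofList pitch_classes).foldl
    (fun (t : PySem.Dict Int Int × PySem.Dict Int Int) pc =>
      if 0 ≤ pc ∧ pc < 12 then
        ([pc, PySem.Int.mod (pc - 4) 12, PySem.Int.mod (pc - 7) 12].foldl
            (fun m r => m.insert r (m.getD r 0 + 1)) t.1,
         [pc, PySem.Int.mod (pc - 3) 12, PySem.Int.mod (pc - 7) 12].foldl
            (fun m r => m.insert r (m.getD r 0 + 1)) t.2)
      else t) (PySem.Dict.empty, PySem.Dict.empty)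
  ((PySem.List.pyRange 0 12).foldl (fun (st : Option String × Int) r =>
      let ms : Int := tabs.1.getD r 0
      let st1 := if ms ≥ 2 ∧ ms > st.2 then
          (some (PySem.List.pyGetD noteNames r "" ++ ":maj"), ms) else st
      let ns : Int := tabs.2.getD r 0
      if ns ≥ 2 ∧ ns > st1.2 then
          (some (PySem.List.pyGetD noteNames r "" ++ ":min"), ns) else st1
    ) ((none : Option String), (0 : Int))).1

-- ===== PRECONDITION & SPEC =====
def Spec_infer_triad (pitch_classes : List Int) (out : Option String) : Prop := out = infer_triad_alt pitch_classes
instance (pitch_classes : List Int) (out : Option String) : Decidable (Spec_infer_triad pitch_classes out) := by unfold Spec_infer_triad; infer_instance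

-- ===== CLAIM (what is proved, stated in full; the proofs are below) =====
def Claim_equal_infer_triad : Prop := ∀ (pitch_classes : List Int), Dom_infer_triad pitch_classes → Spec_infer_triad pitch_classes (infer_triad pitch_classes)

-- ===== LEMMAS AND PROOFS =====

-- pc "hits" the major (resp. minor) triad rooted at v
def hitM (v pc : Int) : Bool := decide ((0 ≤ pc ∧ pc < 12) ∧ (v = pc ∨ v = PySem.Int.mod (pc-4) 12 ∨ v = PySem.Int.mod (pc-7) 12))
def hitN (v pc : Int) : Bool := decide ((0 ≤ pc ∧ pc < 12) ∧ (v = pc ∨ v = PySem.Int.mod (pc-3) 12 ∨ v = PySem.Int.mod (pc-7) 12))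

theorem mod12 (a : Int) : PySem.Int.mod a 12 = a % 12 := by
  simp [PySem.Int.mod, Int.fmod_eq_emod]

-- B's scatter tables, read back at v: each list element contributes its hitM/hitN vote.
theorem tab_getD (l : List Int) (t : PySem.Dict Int Int × PySem.Dict Int Int) (v : Int) :
    (l.foldl (fun t pc =>
      if 0 ≤ pc ∧ pc < 12 then
        ([pc, PySem.Int.mod (pc - 4) 12, PySem.Int.mod (pc - 7) 12].foldl
            (fun m r => m.insert r (m.getD r 0 + 1)) t.1,
         [pc, PySem.Int.mod (pc - 3) 12, PySem.Int.mod (pc - 7) 12].foldl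
            (fun m r => m.insert r (m.getD r 0 + 1)) t.2)
      else t) t).1.getD v 0 = t.1.getD v 0 + (l.countP (hitM v) : Int)
    ∧ (l.foldl (fun t pc =>
      if 0 ≤ pc ∧ pc < 12 then
        ([pc, PySem.Int.mod (pc - 4) 12, PySem.Int.mod (pc - 7) 12].foldl
            (fun m r => m.insert r (m.getD r 0 + 1)) t.1,
         [pc, PySem.Int.mod (pc - 3) 12, PySem.Int.mod (pc - 7) 12].foldl
            (fun m r => m.insert r (m.getD r 0 + 1)) t.2)
      else t) t).2.getD v 0 = t.2.getD v 0 + (l.countP (hitN v) : Int) := by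
  induction l generalizing t with
  | nil => simp
  | cons pc l ih =>
    rw [List.foldl_cons]
    beta_reduce
    by_cases h : 0 ≤ pc ∧ pc < 12
    · have hcM : (List.count v [pc, PySem.Int.mod (pc-4) 12, PySem.Int.mod (pc-7) 12]) = (if hitM v pc then 1 else 0) := by
        simp only [List.count_cons, List.count_nil, beq_iff_eq, hitM, mod12, decide_eq_true_eq]
        split_ifs <;> omega
      have hcN : (List.count v [pc, PySem.Int.mod (pc-3) 12, PySem.Int.mod (pc-7) 12]) = (if hitN v pc then 1 else 0) := by
        simp only [List.count_cons, List.count_nil, beq_iff_eq, hitN, mod12, decide_eq_true_eq]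
        split_ifs <;> omega
      rw [if_pos h]
      rcases ih (([pc, PySem.Int.mod (pc - 4) 12, PySem.Int.mod (pc - 7) 12].foldl
            (fun m r => m.insert r (m.getD r 0 + 1)) t.1,
         [pc, PySem.Int.mod (pc - 3) 12, PySem.Int.mod (pc - 7) 12].foldl
            (fun m r => m.insert r (m.getD r 0 + 1)) t.2)) with ⟨ih1, ih2⟩
      rw [ih1, ih2]
      simp only [List.countP_cons, PySem.Dict.getD_foldl_insert_add_one, hcM, hcN]
      constructor <;> split_ifs <;> push_cast <;> ring
    · rw [if_neg h]
      have hM : hitM v pc = false := by simp [hitM]; omega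
      have hN : hitN v pc = false := by simp [hitN]; omega
      rcases ih t with ⟨ih1, ih2⟩
      simp only [List.countP_cons, hM, hN, Bool.false_eq_true, if_false, add_zero]
      exact ⟨ih1, ih2⟩

-- A's intersection score at root v is the same count of hitting pitch classes.
theorem scoreM (xs : List Int) (v : Int) (hv : 0 ≤ v ∧ v < 12) :
    PySem.Set.len (PySem.Set.inter (PySem.Set.ofList xs)
      (PySem.Set.ofList [v, PySem.Int.mod (v+4) 12, PySem.Int.mod (v+7) 12]))
      = (((PySem.Set.ofList xs).countP (hitM v) : Nat) : Int) := by
  simp only [PySem.Set.len, PySem.Set.inter]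
  rw [← List.countP_eq_length_filter]
  congr 1
  apply List.countP_congr
  intro pc _
  have hmem : (PySem.Set.ofList [v, PySem.Int.mod (v+4) 12, PySem.Int.mod (v+7) 12]).contains pc = true
      ↔ pc ∈ [v, PySem.Int.mod (v+4) 12, PySem.Int.mod (v+7) 12] := by
    simp [PySem.Set.contains, PySem.Set.mem_ofList]
  rw [hmem]
  simp only [hitM, List.mem_cons, List.not_mem_nil, or_false, mod12, decide_eq_true_eq]
  omega

theorem scoreN (xs : List Int) (v : Int) (hv : 0 ≤ v ∧ v < 12) :
    PySem.Set.len (PySem.Set.inter (PySem.Set.ofList xs)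
      (PySem.Set.ofList [v, PySem.Int.mod (v+3) 12, PySem.Int.mod (v+7) 12]))
      = (((PySem.Set.ofList xs).countP (hitN v) : Nat) : Int) := by
  simp only [PySem.Set.len, PySem.Set.inter]
  rw [← List.countP_eq_length_filter]
  congr 1
  apply List.countP_congr
  intro pc _
  have hmem : (PySem.Set.ofList [v, PySem.Int.mod (v+3) 12, PySem.Int.mod (v+7) 12]).contains pc = true
      ↔ pc ∈ [v, PySem.Int.mod (v+3) 12, PySem.Int.mod (v+7) 12] := by
    simp [PySem.Set.contains, PySem.Set.mem_ofList]
  rw [hmem]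
  simp only [hitN, List.mem_cons, List.not_mem_nil, or_false, mod12, decide_eq_true_eq]
  omega

theorem infer_triad_eq_alt (xs : List Int) : infer_triad xs = infer_triad_alt xs := by
  cases xs with
  | nil => decide
  | cons a l =>
    have hne : PySem.Set.ofList (a :: l) ≠ [] := by
      intro h
      have : a ∈ PySem.Set.ofList (a :: l) := by
        rw [PySem.Set.mem_ofList]; exact List.mem_cons_self
      rw [h] at this
      exact List.not_mem_nil this
    unfold infer_triad infer_triad_alt
    simp only [if_neg hne]
    congr 1
    apply PySem.List.foldl_congr_mem
    intro acc root hroot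
    have hr : 0 ≤ root ∧ root < 12 := by
      have e : PySem.List.pyRange 0 12 = [0,1,2,3,4,5,6,7,8,9,10,11] := by decide
      rw [e] at hroot
      simp only [List.mem_cons, List.not_mem_nil, or_false] at hroot
      rcases hroot with h|h|h|h|h|h|h|h|h|h|h|h <;> omega
    have tM := (tab_getD (PySem.Set.ofList (a :: l)) (PySem.Dict.empty, PySem.Dict.empty) root).1
    have tN := (tab_getD (PySem.Set.ofList (a :: l)) (PySem.Dict.empty, PySem.Dict.empty) root).2
    simp only [PySem.Dict.getD_empty, zero_add] at tM tN
    simp only [tM, tN, scoreM (a :: l) root hr, scoreN (a :: l) root hr]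

-- ===== VERDICT (by name: the statement is the Claim_ definition above) =====
theorem infer_triad_spec : Claim_equal_infer_triad := by
  intro xs _
  unfold Spec_infer_triad
  exact infer_triad_eq_alt xs
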